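-- pv_equiv track=rewrite | github.com/UniversityOfMiskolc-AIT/kodolo-DGeradossz94 | coder.py | string_decoding
-- ===== SOURCE A (Python) =====
-- def string_decoding(chars_code_list):
--
--     """
--
--     Arguments:
--
--     string: the string which do decode
--     shift: the shifting value
--
--     This function returns the string.
--
--     """
--
--     string = ""
--     for i in range(len(chars_code_list)):
--         if len(string) == 0:
--             string += chr(chars_code_list[i])
--         else:
--             string += chr(chars_code_list[i] + ord(string[i - 1]))
--     return string
-- ===== SOURCE B (Python) =====
-- def string_decoding(chars_code_list):
--     # Stateless closed form: the i-th character's ordinal is the sum of the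
--     # first i+1 codes, computed independently per position (no running state).
--     return ''.join(chr(sum(chars_code_list[:i + 1]))
--                    for i in range(len(chars_code_list)))
-- ===== Notes on version B (the rewrite author's own statement) =====
-- stated objective: alternative
-- what changed: B has no running state at all: each output character is computed independently from the closed form ord(c_i) = sum(codes[:i+1]) over a slice, trading A's stateful single pass (reading back ord of the previously built character) for a stateless quadratic map.
import Mathlib
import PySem

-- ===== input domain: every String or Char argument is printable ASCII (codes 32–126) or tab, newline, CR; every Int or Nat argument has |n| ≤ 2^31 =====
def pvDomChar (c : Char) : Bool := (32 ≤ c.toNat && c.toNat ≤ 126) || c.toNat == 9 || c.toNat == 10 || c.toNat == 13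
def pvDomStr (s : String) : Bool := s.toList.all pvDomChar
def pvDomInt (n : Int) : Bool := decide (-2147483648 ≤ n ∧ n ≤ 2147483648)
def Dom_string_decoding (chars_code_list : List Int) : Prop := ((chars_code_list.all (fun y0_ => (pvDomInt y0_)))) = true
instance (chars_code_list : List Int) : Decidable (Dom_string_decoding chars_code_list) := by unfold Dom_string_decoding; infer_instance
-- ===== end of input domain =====

-- B replaces A's stateful pass (reading back ord() of the previously built character) by a
-- stateless per-position closed form ord(c_i) = sum(codes[:i+1]) over a slice (alternative;
-- quadratic instead of linear, no running state).


-- chr(n) for n a Lean-valid code point (guaranteed by Pre_); exact there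
def pyChr (n : Int) : Char := Char.ofNat n.toNat

-- ===== PORT A =====
def string_decoding (chars_code_list : List Int) : String :=
  String.ofList
    ((PySem.List.pyRange 0 (chars_code_list.length) 1).foldl
      (fun s i =>
        if s.length = 0 then
          s ++ [pyChr (PySem.List.pyGetD chars_code_list i 0)]
        else
          s ++ [pyChr (PySem.List.pyGetD chars_code_list i 0
                        + (((PySem.Chars.pyGet? s (i - 1)).getD ' ').toNat : Int))])
      [])

-- ===== PORT B =====
def string_decoding_alt (chars_code_list : List Int) : String :=
  String.ofList
    ((List.range chars_code_list.length).map
      (fun (i : Nat) => pyChr ((PySem.List.slice chars_code_list none (some ((i : Int) + 1))).sum)))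

-- ===== PRECONDITION & SPEC =====
-- Pre_ excludes inputs with a prefix sum outside [0, 0x110000) — there Python's chr raises
-- ValueError — and inputs with a prefix sum in the surrogate range 0xD800–0xDFFF, where A
-- returns a lone-surrogate string that is not a valid Unicode string representable as a
-- Lean String (both Pythons return the same unrepresentable value there).
def Pre_string_decoding (chars_code_list : List Int) : Prop :=
  ∀ k ∈ List.range chars_code_list.length,
    0 ≤ (chars_code_list.take (k + 1)).sum ∧
      ((chars_code_list.take (k + 1)).sum < 55296 ∨
        (57344 ≤ (chars_code_list.take (k + 1)).sum ∧
          (chars_code_list.take (k + 1)).sum < 1114112))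
instance (chars_code_list : List Int) : Decidable (Pre_string_decoding chars_code_list) := by
  unfold Pre_string_decoding; infer_instance
def pvWitness_string_decoding : List Int := [104, 1, 6, -3]
def Spec_string_decoding (chars_code_list : List Int) (out : String) : Prop := out = string_decoding_alt chars_code_list
instance (chars_code_list : List Int) (out : String) : Decidable (Spec_string_decoding chars_code_list out) := by unfold Spec_string_decoding; infer_instance

-- ===== CLAIM (what is proved, stated in full; the proofs are below) =====
def Claim_equal_string_decoding : Prop := ∀ (chars_code_list : List Int), Dom_string_decoding chars_code_list → Pre_string_decoding chars_code_list → Spec_string_decoding chars_code_list (string_decoding chars_code_list)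

-- ===== LEMMAS AND PROOFS =====

theorem pyChr_toNat (n : Int) (h0 : 0 ≤ n)
    (hv : n < 55296 ∨ (57344 ≤ n ∧ n < 1114112)) : ((pyChr n).toNat : Int) = n := by
  have hval : n.toNat.isValidChar := by
    unfold Nat.isValidChar
    omega
  simp [pyChr, Char.ofNat, Char.toNat, Char.ofNatAux, hval]
  omega

-- B's slice is a take: each mapped entry is pyChr of the (k+1)-st prefix sum
theorem alt_eq_map_take (l : List Int) :
    string_decoding_alt l
      = String.ofList ((List.range l.length).map (fun k => pyChr ((l.take (k + 1)).sum))) := by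
  unfold string_decoding_alt
  congr 1
  apply List.map_congr_left
  intro k _
  have : ((k : Int) + 1) = ((k + 1 : Nat) : Int) := by push_cast; ring
  rw [this, PySem.List.slice_to_natCast]

-- A's fold over the first n indices produces the chr's of the first n prefix sums
theorem a_fold_eq (l : List Int) (hpre : Pre_string_decoding l) :
    ∀ n, n ≤ l.length →
      ((PySem.List.pyRange 0 (n : Int) 1).foldl
        (fun s i =>
          if s.length = 0 then
            s ++ [pyChr (PySem.List.pyGetD l i 0)]
          else
            s ++ [pyChr (PySem.List.pyGetD l i 0
                          + (((PySem.Chars.pyGet? s (i - 1)).getD ' ').toNat : Int))])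
        [])
        = (List.range n).map (fun k => pyChr ((l.take (k + 1)).sum)) := by
  intro n hn
  induction n with
  | zero => simp [PySem.List.pyRange_one_eq_nil]
  | succ n ih =>
      have hn' : n ≤ l.length := Nat.le_of_succ_le hn
      have hlt : n < l.length := hn
      have hsplit : PySem.List.pyRange 0 ((n + 1 : Nat) : Int) 1
          = PySem.List.pyRange 0 (n : Int) 1 ++ [(n : Int)] := by
        have := PySem.List.pyRange_one_succ_right (a := 0) (b := (n : Int)) (by positivity)
        simpa using this
      rw [hsplit, List.foldl_append, ih hn']
      have hget : PySem.List.pyGetD l ((n : Nat) : Int) 0 = l[n] :=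
        PySem.List.pyGetD_natCast l n 0 ▸ List.getD_eq_getElem l 0 hlt
      have htake : (l.take (n + 1)).sum = (l.take n).sum + l[n] :=
        List.sum_take_succ l n hlt
      cases n with
      | zero =>
          simp only [List.range_zero, List.map_nil, List.foldl_cons, List.foldl_nil,
            List.length_nil, List.nil_append]
          rw [List.range_one]
          simp only [List.map_cons, List.map_nil]
          rw [hget]
          rw [htake]; simp
      | succ m =>
          have hlen : ((List.range (m + 1)).map
              (fun k => pyChr ((l.take (k + 1)).sum))).length = m + 1 := by simp
          simp only [List.foldl_cons, List.foldl_nil]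
          rw [if_neg (by omega)]
          have hidx : ((m + 1 : Nat) : Int) - 1 = ((m : Nat) : Int) := by push_cast; ring
          have hgetc : (PySem.Chars.pyGet?
              ((List.range (m + 1)).map (fun k => pyChr ((l.take (k + 1)).sum)))
              (((m + 1 : Nat) : Int) - 1)).getD ' '
              = pyChr ((l.take (m + 1)).sum) := by
            rw [hidx]
            rw [PySem.Chars.pyGet?_eq_listPyGet?, PySem.List.pyGet?_natCast]
            simp
          rw [hgetc, hget]
          have hsum : (l.take (m + 1)).sum < 55296 ∨
              (57344 ≤ (l.take (m + 1)).sum ∧ (l.take (m + 1)).sum < 1114112) := by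
            have := hpre (m) (by simp; omega)
            exact this.2
          have hpos : 0 ≤ (l.take (m + 1)).sum := (hpre (m) (by simp; omega)).1
          rw [pyChr_toNat _ hpos hsum]
          have hb : pyChr (l[m + 1] + (l.take (m + 1)).sum)
              = pyChr ((l.take (m + 1 + 1)).sum) := by
            rw [htake]; ring_nf
          rw [hb]
          conv_rhs => rw [List.range_succ, List.map_append, List.range_succ, List.map_append]
          simp
          rw [List.range_succ, List.map_append]
          simp

-- ===== VERDICT (by name: the statement is the Claim_ definition above) =====
theorem string_decoding_spec : Claim_equal_string_decoding := by
  intro l _ hpre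
  unfold Spec_string_decoding string_decoding
  rw [alt_eq_map_take]
  rw [a_fold_eq l hpre l.length le_rfl]
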